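-- pv_equiv track=rewrite | github.com/Sywth/tableau-solver | src/interpreter.py | validate_binary_connectives
-- ===== SOURCE A (Python) =====
-- class LANGUAGE_CONSTANTS:
--     class SYMBOLS:
--         SYMBOL_NEGATION = "~"
--         SYMBOL_OPEN_BRACKET = "("
--         SYMBOL_CLOSE_BRACKET = ")"
--         SYMBOL_CONJUNCTION = "/\\"
--         SYMBOL_DISJUNCTION = "\\/"
--         SYMBOL_IMPLICATION = "=>"
--         SYMBOL_EXISTENTIAL = "E"
--         SYMBOL_UNIVERSAL = "A"
--
--     class LETTERS_PROPOSITION: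
--         LETTER_p = "p"
--         LETTER_q = "q"
--         LETTER_r = "r"
--         LETTER_s = "s"
--
--     class LETTERS_PREDICATE:
--         LETTER_P = "P"
--         LETTER_Q = "Q"
--         LETTER_R = "R"
--         LETTER_S = "S"
--
--     class LETTERS_VARIABLE:
--         LETTER_x = "x"
--         LETTER_y = "y"
--         LETTER_z = "z"
--         LETTER_w = "w"
--
--     PREDICATE_VARIABLE_SEPERATOR = ","
--
-- SET_LANGUAGE_PREDICATE_LETTERS: set[str] = {
--     LANGUAGE_CONSTANTS.LETTERS_PREDICATE.LETTER_P,
--     LANGUAGE_CONSTANTS.LETTERS_PREDICATE.LETTER_Q,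
--     LANGUAGE_CONSTANTS.LETTERS_PREDICATE.LETTER_R,
--     LANGUAGE_CONSTANTS.LETTERS_PREDICATE.LETTER_S,
-- }
--
-- SET_OF_ALL_BINARY_CONNECTIVES: set[str] = {
--     LANGUAGE_CONSTANTS.SYMBOLS.SYMBOL_CONJUNCTION,
--     LANGUAGE_CONSTANTS.SYMBOLS.SYMBOL_DISJUNCTION,
--     LANGUAGE_CONSTANTS.SYMBOLS.SYMBOL_IMPLICATION,
-- }
--
-- def validate_binary_connectives(tokens: list[str]) -> bool:
--     open_bracket_count = 0
--     close_bracket_count = 0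
--     binary_connective_count = 0
--     predicate_count = 0
--     for c in tokens:
--         if c in SET_OF_ALL_BINARY_CONNECTIVES:
--             binary_connective_count += 1
--         if c == LANGUAGE_CONSTANTS.SYMBOLS.SYMBOL_OPEN_BRACKET:
--             open_bracket_count += 1
--         if c == LANGUAGE_CONSTANTS.SYMBOLS.SYMBOL_CLOSE_BRACKET:
--             close_bracket_count += 1
--         if c in SET_LANGUAGE_PREDICATE_LETTERS:
--             predicate_count += 1
--             # my tokenizer removes predicate brackets so we add them here
--             open_bracket_count += 1
--             close_bracket_count += 1
--
--     # validate brackets count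
--     if open_bracket_count != close_bracket_count:
--         return False
--
--     number_of_expected_brackets = (binary_connective_count + predicate_count) * 2
--     if number_of_expected_brackets != open_bracket_count + close_bracket_count:
--         return False
--
--     return True
-- ===== SOURCE B (Python) =====
-- def validate_binary_connectives(tokens: list[str]) -> bool:
--     # Predicate letters add one to each bracket count, so they cancel out of both
--     # checks; the condition reduces to "(" count == ")" count == binary-connective count.
--     opens = tokens.count("(")
--     closes = tokens.count(")")
--     binaries = tokens.count("/\\") + tokens.count("\\/") + tokens.count("=>")
--     return opens == closes == binaries
-- ===== Notes on version B (the rewrite author's own statement) =====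
-- stated objective: simpler
-- what changed: Replaced the four-counter accumulating loop and two-step equality check by a closed-form observation: predicate letters increment both bracket counts equally, so the whole condition reduces to count('(') == count(')') == number of binary connectives, computed with list.count per relevant token.
import Mathlib
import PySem

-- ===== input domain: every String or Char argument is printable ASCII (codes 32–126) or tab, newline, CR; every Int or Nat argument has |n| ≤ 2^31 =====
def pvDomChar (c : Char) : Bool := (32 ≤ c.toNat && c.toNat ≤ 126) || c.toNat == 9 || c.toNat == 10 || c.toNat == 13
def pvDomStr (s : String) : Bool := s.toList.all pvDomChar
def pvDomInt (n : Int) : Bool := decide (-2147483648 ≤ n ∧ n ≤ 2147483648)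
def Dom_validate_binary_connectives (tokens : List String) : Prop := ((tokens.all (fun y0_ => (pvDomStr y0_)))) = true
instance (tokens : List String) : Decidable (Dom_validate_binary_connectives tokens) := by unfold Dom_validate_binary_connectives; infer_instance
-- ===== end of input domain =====

-- B replaces A's four-counter loop by the algebraically reduced check count("(") = count(")") = number of binary connectives (predicate letters cancel from both sides): simpler.


-- ===== PORT A =====
def validate_binary_connectives (tokens : List String) : Bool :=
  let st := tokens.foldl (fun (s : Int × Int × Int × Int) c =>
    let (ob, cb, bc, pc) := s
    let bc := if ["/\\", "\\/", "=>"].contains c then bc + 1 else bc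
    let ob := if c == "(" then ob + 1 else ob
    let cb := if c == ")" then cb + 1 else cb
    -- predicate letter: counts once and adds a bracket pair
    let (pc, ob, cb) := if ["P", "Q", "R", "S"].contains c then (pc + 1, ob + 1, cb + 1) else (pc, ob, cb)
    (ob, cb, bc, pc)) (0, 0, 0, 0)
  let (ob, cb, bc, pc) := st
  if ob ≠ cb then false
  else if (bc + pc) * 2 ≠ ob + cb then false
  else true

-- ===== PORT B =====
-- B: predicate letters add one to EACH bracket count, so they cancel out of both
-- checks; the condition reduces to count "(" = count ")" = count of binary connectives.
def validate_binary_connectives_alt (tokens : List String) : Bool :=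
  let opens := PySem.List.count tokens "("
  let closes := PySem.List.count tokens ")"
  let binaries := PySem.List.count tokens "/\\" + PySem.List.count tokens "\\/" + PySem.List.count tokens "=>"
  decide (opens = closes) && decide (closes = binaries)

-- ===== PRECONDITION & SPEC =====
def Spec_validate_binary_connectives (tokens : List String) (out : Bool) : Prop := out = validate_binary_connectives_alt tokens
instance (tokens : List String) (out : Bool) : Decidable (Spec_validate_binary_connectives tokens out) := by unfold Spec_validate_binary_connectives; infer_instance

-- ===== CLAIM (what is proved, stated in full; the proofs are below) =====
def Claim_equal_validate_binary_connectives : Prop := ∀ (tokens : List String), Dom_validate_binary_connectives tokens → Spec_validate_binary_connectives tokens (validate_binary_connectives tokens)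

-- ===== LEMMAS AND PROOFS =====

-- ===== VERDICT (by name: the statement is the Claim_ definition above) =====
-- loop invariant: the fold accumulates the four counts onto an arbitrary start state
theorem vbc_foldl_char (tokens : List String) (ob cb bc pc : Int) :
    tokens.foldl (fun (s : Int × Int × Int × Int) c =>
      let (ob, cb, bc, pc) := s
      let bc := if ["/\\", "\\/", "=>"].contains c then bc + 1 else bc
      let ob := if c == "(" then ob + 1 else ob
      let cb := if c == ")" then cb + 1 else cb
      let (pc, ob, cb) := if ["P", "Q", "R", "S"].contains c then (pc + 1, ob + 1, cb + 1) else (pc, ob, cb)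
      (ob, cb, bc, pc)) (ob, cb, bc, pc)
    = (ob + tokens.count "(" + tokens.countP (fun c => ["P", "Q", "R", "S"].contains c),
       cb + tokens.count ")" + tokens.countP (fun c => ["P", "Q", "R", "S"].contains c),
       bc + tokens.countP (fun c => ["/\\", "\\/", "=>"].contains c),
       pc + tokens.countP (fun c => ["P", "Q", "R", "S"].contains c)) := by
  induction tokens generalizing ob cb bc pc with
  | nil => simp
  | cons x xs ih =>
    simp only [List.foldl_cons, List.count_cons, List.countP_cons]
    rw [ih]
    split_ifs <;> simp_all [Prod.mk.injEq] <;> omega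

-- the three binary connectives are pairwise distinct, so the countP splits into three counts
theorem countP_bin_eq (l : List String) :
    (l.countP (fun c => ["/\\", "\\/", "=>"].contains c) : Int)
    = l.count "/\\" + l.count "\\/" + l.count "=>" := by
  induction l with
  | nil => simp
  | cons x xs ih =>
    simp only [List.countP_cons, List.count_cons]
    by_cases h1 : x = "/\\" <;> by_cases h2 : x = "\\/" <;> by_cases h3 : x = "=>" <;>
      simp_all <;> omega

theorem validate_binary_connectives_spec : Claim_equal_validate_binary_connectives := by
  intro tokens _
  unfold Spec_validate_binary_connectives validate_binary_connectives validate_binary_connectives_alt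
  simp only [vbc_foldl_char, PySem.List.count_eq]
  simp only [zero_add]
  rw [countP_bin_eq tokens]
  split_ifs with h1 h2 <;>
    simp_all <;> omega
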